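-- pv_equiv track=rewrite | github.com/mayjspencer/dsa-practice | AdditionalTechniques/fixedslidingwindow.py | min_sum_fixed_window
-- ===== SOURCE A (Python) =====
-- def min_sum_fixed_window(arr, k):
--     low = 0
--     high = k
--     sum = 0
--     # Calculate the sum of the first window
--     for i in range(low, high):
--         sum += arr[i]
--     minsum = sum
--
--     # Slide the window one element at a time and track min sum
--     while high <= len(arr):
--         sum = 0
--         for i in range(low, high):
--             sum += arr[i]
--         if sum < minsum:
--             minsum = sum
--         low += 1
--         high += 1
--
--     return minsum
-- ===== SOURCE B (Python) =====
-- def min_sum_fixed_window(arr, k):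
--     s = sum(arr[:k])
--     m = s
--     for i in range(k, len(arr)):
--         s += arr[i] - arr[i - k]
--         if s < m:
--             m = s
--     return m
-- ===== Notes on version B (the rewrite author's own statement) =====
-- stated objective: faster
-- what changed: B replaces A's re-summation of every window from scratch by an incremental sliding window (add the entering element, subtract the leaving one), one pass with O(1) work per step.
-- outside the precondition, e.g. on min_sum_fixed_window([1, 2], -1): A returns 0, B raises IndexError
import Mathlib
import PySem

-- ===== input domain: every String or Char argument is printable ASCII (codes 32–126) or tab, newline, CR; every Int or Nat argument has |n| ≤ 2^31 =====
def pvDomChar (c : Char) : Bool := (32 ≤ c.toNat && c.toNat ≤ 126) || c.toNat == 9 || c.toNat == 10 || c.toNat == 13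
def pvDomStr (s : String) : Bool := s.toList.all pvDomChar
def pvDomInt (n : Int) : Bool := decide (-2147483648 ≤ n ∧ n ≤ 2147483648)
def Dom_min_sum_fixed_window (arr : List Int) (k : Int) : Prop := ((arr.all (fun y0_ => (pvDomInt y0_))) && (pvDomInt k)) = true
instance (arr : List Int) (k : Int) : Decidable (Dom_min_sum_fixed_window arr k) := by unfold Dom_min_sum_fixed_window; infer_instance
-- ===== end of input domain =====

-- B replaces A's per-window re-summation (O(n*k)) by an incremental sliding window (O(n)): add the entering element, subtract the leaving one.


-- ===== PORT A =====
-- sum = 0; for i in range(low, high): sum += arr[i]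
def pvWinSum (arr : List Int) (low high : Int) : Int :=
  (PySem.List.pyRange low high 1).foldl (fun s i => s + PySem.List.pyGetD arr i 0) 0

-- the while loop; fuel = number of iterations (high goes up by 1 each turn until high > len(arr))
def pvALoop (arr : List Int) : Nat → Int → Int → Int → Int
  | 0, _, _, minsum => minsum
  | n+1, low, high, minsum =>
      let s := pvWinSum arr low high
      pvALoop arr n (low+1) (high+1) (if s < minsum then s else minsum)

def min_sum_fixed_window (arr : List Int) (k : Int) : Int :=
  let sum := pvWinSum arr 0 k
  let minsum := sum
  pvALoop arr ((arr.length : Int) - k + 1).toNat 0 k minsum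

-- ===== PORT B =====
-- s += arr[i] - arr[i - k]; if s < m: m = s
def pvBStep (arr : List Int) (k : Int) (sm : Int × Int) (i : Int) : Int × Int :=
  let s := sm.1 + PySem.List.pyGetD arr i 0 - PySem.List.pyGetD arr (i - k) 0
  (s, if s < sm.2 then s else sm.2)

def min_sum_fixed_window_alt (arr : List Int) (k : Int) : Int :=
  let s := (PySem.List.slice arr none (some k)).sum
  ((PySem.List.pyRange k (arr.length : Int) 1).foldl (pvBStep arr k) (s, s)).2

-- ===== PRECONDITION & SPEC =====
-- Pre_ excludes k > len(arr), where A raises IndexError, and k < 0, where A's return of 0 is an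
-- accident of Python's empty ranges (B's natural loop raises IndexError there).
def Pre_min_sum_fixed_window (arr : List Int) (k : Int) : Prop := 0 ≤ k ∧ k ≤ (arr.length : Int)
instance (arr : List Int) (k : Int) : Decidable (Pre_min_sum_fixed_window arr k) := by unfold Pre_min_sum_fixed_window; infer_instance
def pvWitness_min_sum_fixed_window : List Int × Int := ([1, -2, 3], 2)

def Spec_min_sum_fixed_window (arr : List Int) (k : Int) (out : Int) : Prop := out = min_sum_fixed_window_alt arr k
instance (arr : List Int) (k : Int) (out : Int) : Decidable (Spec_min_sum_fixed_window arr k out) := by unfold Spec_min_sum_fixed_window; infer_instance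

-- ===== CLAIM (what is proved, stated in full; the proofs are below) =====
def Claim_equal_min_sum_fixed_window : Prop := ∀ (arr : List Int) (k : Int), Dom_min_sum_fixed_window arr k → Pre_min_sum_fixed_window arr k → Spec_min_sum_fixed_window arr k (min_sum_fixed_window arr k)
-- ===== LEMMAS AND PROOFS =====

-- sum of the window of length kn starting at position t
def pvW (arr : List Int) (kn t : Nat) : Int := ((arr.drop t).take kn).sum
-- the min-accumulating step both loops perform, expressed on window start positions
def pvM (arr : List Int) (kn : Nat) (m : Int) (t : Nat) : Int :=
  if pvW arr kn t < m then pvW arr kn t else m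

theorem pvW_succ (arr : List Int) (kn t : Nat) (h : t < arr.length) :
    pvW arr (kn+1) t = arr[t] + pvW arr kn (t+1) := by
  unfold pvW
  rw [List.drop_eq_getElem_cons h, List.take_succ_cons, List.sum_cons]

theorem pvW_last (arr : List Int) (kn t : Nat) (h : t + kn < arr.length) :
    pvW arr (kn+1) t = pvW arr kn t + arr[t + kn] := by
  have hk : kn < (arr.drop t).length := by rw [List.length_drop]; omega
  have hg : (arr.drop t)[kn] = arr[t + kn]'h := by rw [List.getElem_drop]
  unfold pvW
  rw [List.take_add_one, List.getElem?_eq_getElem hk, hg]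
  simp

theorem pvWinSum_eq (arr : List Int) (kn : Nat) (t : Nat) (c : Int) (h : t + kn ≤ arr.length) :
    (PySem.List.pyRange (t : Int) ((t : Int) + (kn : Int)) 1).foldl
      (fun s i => s + PySem.List.pyGetD arr i 0) c = c + pvW arr kn t := by
  induction kn generalizing t c with
  | zero => rw [PySem.List.pyRange_one_eq_nil (by omega)]; simp [pvW]
  | succ kn ih =>
    rw [PySem.List.pyRange_one_cons (by omega)]
    simp only [List.foldl_cons]
    have h3 : (t : Int) + ((kn : Nat)+1 : Nat) = ((t : Int) + 1) + (kn : Int) := by push_cast; ring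
    have h4 : ((t : Int) + 1) = ((t+1 : Nat) : Int) := by push_cast; ring
    rw [h3, h4, ih (t+1) _ (by omega)]
    have ht : t < arr.length := by omega
    rw [pvW_succ arr kn t ht]
    simp only [PySem.List.pyGetD_natCast]
    rw [List.getD_eq_getElem _ _ ht]
    ring

theorem pvALoop_eq (arr : List Int) (kn : Nat) (fuel t : Nat) (m : Int)
    (h : t + fuel + kn ≤ arr.length + 1) :
    pvALoop arr fuel (t : Int) ((t : Int) + (kn : Int)) m
      = (List.range' t fuel).foldl (pvM arr kn) m := by
  induction fuel generalizing t m with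
  | zero => simp [pvALoop]
  | succ fuel ih =>
    simp only [pvALoop]
    have hw : pvWinSum arr (t : Int) ((t : Int) + (kn : Int)) = pvW arr kn t := by
      have := pvWinSum_eq arr kn t 0 (by omega)
      simpa [pvWinSum] using this
    have h2 : ((t : Int) + 1) = ((t+1 : Nat) : Int) := by push_cast; ring
    have h3 : ((t : Int) + (kn : Int) + 1) = ((t+1 : Nat) : Int) + (kn : Int) := by push_cast; ring
    rw [hw, h2, h3, ih (t+1) _ (by omega)]
    rw [List.range'_succ]
    simp [pvM]

theorem pvW_slide (arr : List Int) (kn t : Nat) (h : t + kn < arr.length) :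
    pvW arr kn t + arr.getD (t + kn) 0 - arr.getD t 0 = pvW arr kn (t+1) := by
  have ht : t < arr.length := by omega
  have e1 : pvW arr (kn+1) t = arr[t] + pvW arr kn (t+1) := pvW_succ arr kn t ht
  have e2 : pvW arr (kn+1) t = pvW arr kn t + arr[t + kn] := pvW_last arr kn t h
  rw [List.getD_eq_getElem _ _ h, List.getD_eq_getElem _ _ ht]
  omega

theorem pvBLoop_eq (arr : List Int) (kn : Nat) (cnt t : Nat) (m : Int)
    (h : t + kn + cnt = arr.length) :
    ((PySem.List.pyRange ((t : Int) + (kn : Int)) (arr.length : Int) 1).foldl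
        (pvBStep arr (kn : Int)) (pvW arr kn t, m)).2
      = (List.range' (t+1) cnt).foldl (pvM arr kn) m := by
  induction cnt generalizing t m with
  | zero => rw [PySem.List.pyRange_one_eq_nil (by omega)]; simp
  | succ cnt ih =>
    rw [PySem.List.pyRange_one_cons (by omega)]
    simp only [List.foldl_cons]
    have hstep : pvBStep arr (kn : Int) (pvW arr kn t, m) ((t : Int) + (kn : Int))
        = (pvW arr kn (t+1), pvM arr kn m (t+1)) := by
      simp only [pvBStep, pvM]
      have hi : (t : Int) + (kn : Int) - (kn : Int) = (t : Int) := by ring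
      have hc : (t : Int) + (kn : Int) = ((t + kn : Nat) : Int) := by push_cast; ring
      rw [hi, hc]
      simp only [PySem.List.pyGetD_natCast]
      rw [pvW_slide arr kn t (by omega)]
    rw [hstep]
    have h2 : (t : Int) + (kn : Int) + 1 = ((t+1 : Nat) : Int) + (kn : Int) := by push_cast; ring
    rw [h2, ih (t+1) _ (by omega)]
    rw [List.range'_succ, List.foldl_cons]

theorem pv_main (arr : List Int) (k : Int) (hk : 0 ≤ k) (hle : k ≤ (arr.length : Int)) :
    min_sum_fixed_window arr k = min_sum_fixed_window_alt arr k := by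
  obtain ⟨kn, rfl⟩ : ∃ kn : Nat, k = (kn : Int) := ⟨k.toNat, (Int.toNat_of_nonneg hk).symm⟩
  have hkn : kn ≤ arr.length := by exact_mod_cast hle
  have hfuel : ((arr.length : Int) - (kn : Int) + 1).toNat = (arr.length - kn) + 1 := by omega
  have hA : min_sum_fixed_window arr (kn : Int)
      = (List.range' 0 (arr.length - kn + 1)).foldl (pvM arr kn) (pvW arr kn 0) := by
    unfold min_sum_fixed_window
    have hw : pvWinSum arr 0 (kn : Int) = pvW arr kn 0 := by
      have := pvWinSum_eq arr kn 0 0 (by omega)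
      simpa [pvWinSum] using this
    have := pvALoop_eq arr kn (arr.length - kn + 1) 0 (pvW arr kn 0) (by omega)
    simp only [Nat.cast_zero, zero_add] at this hw
    rw [hfuel, hw, this]
  have hB : min_sum_fixed_window_alt arr (kn : Int)
      = (List.range' 1 (arr.length - kn)).foldl (pvM arr kn) (pvW arr kn 0) := by
    unfold min_sum_fixed_window_alt
    have hs : PySem.List.slice arr none (some (kn : Int)) = arr.take kn :=
      PySem.List.slice_to_natCast arr kn
    have hsum : (arr.take kn).sum = pvW arr kn 0 := by simp [pvW]
    have := pvBLoop_eq arr kn (arr.length - kn) 0 (pvW arr kn 0) (by omega)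
    simp only [Nat.cast_zero, zero_add] at this
    rw [hs, hsum, this]
  rw [hA, hB]
  rw [List.range'_succ]
  simp only [List.foldl_cons]
  have hm : pvM arr kn (pvW arr kn 0) 0 = pvW arr kn 0 := by simp [pvM]
  rw [hm]

-- ===== VERDICT (by name: the statement is the Claim_ definition above) =====
theorem min_sum_fixed_window_spec : Claim_equal_min_sum_fixed_window := by
  intro arr k _ hpre
  exact pv_main arr k hpre.1 hpre.2
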